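-- pv_equiv track=rewrite | github.com/hmelder/AnkiTUM | .github/workflows/id_fixup.py | collect_existingIDs
-- ===== SOURCE A (Python) =====
-- class DuplicateIDError(Exception):
--     def __init__(self, id: int):
--         self.id = id
--
-- def collect_existingIDs(cards):
--     """
--     Collects all IDs in the list of cards and returns them as a set
--     """
--     found_ids = set()
--     for card in cards:
--         if "id" in card:
--             if card["id"] in found_ids:
--                 raise DuplicateIDError(card["id"])
--
--             found_ids.add(card["id"])
--
--     return found_ids
-- ===== SOURCE B (Python) =====
-- class DuplicateIDError(Exception):
--     def __init__(self, id: int):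
--         self.id = id
--
-- def collect_existingIDs(cards):
--     """
--     Collects all IDs in the list of cards and returns them as a set
--     """
--     ids = [card["id"] for card in cards if "id" in card]
--     if len(ids) != len(set(ids)):
--         # locate the first id that repeats (in iteration order) and report it
--         seen = set()
--         for i in ids:
--             if i in seen:
--                 raise DuplicateIDError(i)
--             seen.add(i)
--     return set(ids)
-- ===== Notes on version B (the rewrite author's own statement) =====
-- stated objective: alternative
-- what changed: A interleaves membership test, duplicate raise and set insertion in one early-exiting pass over the cards; B first materializes the id list with a comprehension, detects duplicates by a len(ids) != len(set(ids)) comparison, only then runs a locating loop to raise on the first repeated id, and returns set(ids) directly on the clean path.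
import Mathlib
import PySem

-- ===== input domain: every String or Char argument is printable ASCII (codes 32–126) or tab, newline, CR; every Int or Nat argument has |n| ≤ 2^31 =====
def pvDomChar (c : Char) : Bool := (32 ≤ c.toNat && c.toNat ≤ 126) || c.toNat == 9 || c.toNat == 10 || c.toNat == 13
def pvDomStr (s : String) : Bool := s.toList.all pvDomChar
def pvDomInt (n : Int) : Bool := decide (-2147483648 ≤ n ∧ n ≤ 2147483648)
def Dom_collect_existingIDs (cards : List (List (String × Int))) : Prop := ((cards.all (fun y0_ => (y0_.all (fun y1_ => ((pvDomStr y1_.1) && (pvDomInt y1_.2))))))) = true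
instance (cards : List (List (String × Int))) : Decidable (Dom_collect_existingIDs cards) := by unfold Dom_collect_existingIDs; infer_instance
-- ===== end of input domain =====

-- B replaces A's single early-exiting pass (test / raise / insert per card) by a
-- build-then-check decomposition: materialize the id list, compare its length with
-- its deduplication, and only on the duplicate path locate the first repeat to raise.
-- Alternative decomposition, same O(n) cost; equivalence on the non-raising inputs.


-- ===== PORT A =====
-- "id" in card / card["id"]: first match in the association list (Python dict lookup)
def pvGetIdA (card : List (String × Int)) : Option Int :=
  (card.find? (fun p => p.1 == "id")).map (·.2)

-- the for-loop over cards carrying found_ids; the duplicate branch raises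
-- DuplicateIDError in Python (those inputs are outside Pre_; the port returns
-- the set accumulated so far there, a dead value under Pre_)
def pvLoopA : List (List (String × Int)) → PySem.Set Int → List Int
  | [], found => found
  | card :: rest, found =>
      match pvGetIdA card with
      | none => pvLoopA rest found
      | some v =>
          if PySem.Set.contains found v then found   -- raise DuplicateIDError(v)
          else pvLoopA rest (PySem.Set.add found v)

def collect_existingIDs (cards : List (List (String × Int))) : List Int :=
  pvLoopA cards PySem.Set.empty

-- ===== PORT B =====
-- ids = [card["id"] for card in cards if "id" in card]
def pvIdsB (cards : List (List (String × Int))) : List Int :=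
  cards.filterMap (fun card => (card.find? (fun p => p.1 == "id")).map (·.2))

-- ids := pvIdsB cards (the comprehension), then the length comparison against set(ids)
def collect_existingIDs_alt (cards : List (List (String × Int))) : List Int :=
  if (PySem.Set.ofList (pvIdsB cards)).length ≠ (pvIdsB cards).length then
    []   -- the locating loop raises DuplicateIDError here (outside Pre_); dead value
  else
    PySem.Set.ofList (pvIdsB cards)

-- ===== PRECONDITION & SPEC =====
-- Pre_ excludes exactly the inputs with a repeated id, on which Python A raises
-- DuplicateIDError (B raises the same error there).
def Pre_collect_existingIDs (cards : List (List (String × Int))) : Prop :=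
  (pvIdsB cards).Nodup
instance (cards : List (List (String × Int))) : Decidable (Pre_collect_existingIDs cards) := by
  unfold Pre_collect_existingIDs; infer_instance

def pvWitness_collect_existingIDs : (List (List (String × Int))) :=
  [[("id", 3), ("front", 0)], [("front", 1)], [("id", 5)]]

def Spec_collect_existingIDs (cards : List (List (String × Int))) (out : List Int) : Prop := out = collect_existingIDs_alt cards
instance (cards : List (List (String × Int))) (out : List Int) : Decidable (Spec_collect_existingIDs cards out) := by unfold Spec_collect_existingIDs; infer_instance

-- ===== CLAIM (what is proved, stated in full; the proofs are below) =====
def Claim_equal_collect_existingIDs : Prop := ∀ (cards : List (List (String × Int))), Dom_collect_existingIDs cards → Pre_collect_existingIDs cards → Spec_collect_existingIDs cards (collect_existingIDs cards)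

-- ===== LEMMAS AND PROOFS =====

-- A's loop, run on a nodup extension of its accumulator, appends exactly the ids list
lemma pvLoopA_eq_append (cards : List (List (String × Int))) (found : List Int)
    (h : (found ++ pvIdsB cards).Nodup) :
    pvLoopA cards found = found ++ pvIdsB cards := by
  induction cards generalizing found with
  | nil => simp [pvLoopA, pvIdsB]
  | cons card rest ih =>
      by_cases hc : ∃ v, pvGetIdA card = some v
      · obtain ⟨v, hv⟩ := hc
        have hv' : (card.find? (fun p => p.1 == "id")).map (·.2) = some v := hv
        have hids : pvIdsB (card :: rest) = v :: pvIdsB rest := by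
          simp only [pvIdsB, List.filterMap_cons, hv']
        rw [hids] at h
        have hd := List.disjoint_of_nodup_append h
        have hvnot : v ∉ found := fun hmem => hd hmem (by simp)
        have hcont : PySem.Set.contains found v = false := by
          simp [PySem.Set.contains]
          exact hvnot
        have hadd : PySem.Set.add found v = found ++ [v] :=
          PySem.Set.add_of_not_mem hvnot
        have h' : ((found ++ [v]) ++ pvIdsB rest).Nodup := by
          simpa [List.append_assoc] using h
        simp only [pvLoopA, hv, hcont, Bool.false_eq_true, if_false, hadd]
        rw [ih _ h', hids, List.append_assoc]; rfl
      · have hn : pvGetIdA card = none := Option.eq_none_iff_forall_ne_some.mpr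
          (fun v hv => hc ⟨v, hv⟩)
        have hn' : (card.find? (fun p => p.1 == "id")).map (·.2) = none := hn
        have hids : pvIdsB (card :: rest) = pvIdsB rest := by
          simp only [pvIdsB, List.filterMap_cons, hn']
        rw [hids] at h
        simp only [pvLoopA, hn]
        rw [ih _ h, hids]

-- folding Set.add over a list disjointly-nodup with the accumulator appends it
lemma foldl_add_of_nodup (xs : List Int) (s : List Int) (hs : (s ++ xs).Nodup) :
    xs.foldl PySem.Set.add s = s ++ xs := by
  induction xs generalizing s with
  | nil => simp
  | cons x rest ih =>
      have hx : x ∉ s := fun hmem => List.disjoint_of_nodup_append hs hmem (by simp)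
      simp only [List.foldl_cons, PySem.Set.add_of_not_mem hx]
      rw [ih (s ++ [x]) (by simpa [List.append_assoc] using hs), List.append_assoc]
      rfl

-- set(xs) is xs itself when xs has no duplicates
lemma ofList_eq_self_of_nodup (xs : List Int) (h : xs.Nodup) : PySem.Set.ofList xs = xs := by
  rw [PySem.Set.ofList_eq_foldl]
  simpa using foldl_add_of_nodup xs [] (by simpa using h)

-- ===== VERDICT (by name: the statement is the Claim_ definition above) =====
theorem collect_existingIDs_spec : Claim_equal_collect_existingIDs := by
  intro cards _ hpre
  unfold Spec_collect_existingIDs collect_existingIDs collect_existingIDs_alt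
  show pvLoopA cards [] = _
  rw [pvLoopA_eq_append cards [] (by simpa using hpre),
      ofList_eq_self_of_nodup (pvIdsB cards) hpre]
  simp
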